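-- pv_equiv track=rewrite | github.com/leechristie/advent-of-code-2025 | solvers/day10.py | possible_ranges
-- ===== SOURCE A (Python) =====
-- def possible_ranges(required_joltages: list[int], buttons: list[tuple[int, ...]]) -> tuple[list[int], list[int], list[int], list[set[int]]]:
--     affecting_button_counts: list[int] = [0] * len(required_joltages)
--     mimimums: list[int] = [0] * len(buttons)
--     maximums: list[int] = [max(required_joltages)] * len(buttons)
--     friends: list[set[int]] = [set() for _ in range(len(buttons))]
--     for index, required_joltage in enumerate(required_joltages):
--         supported_button_ids: list[int] = []
--         for button_id, button in enumerate(buttons):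
--             if button is not None:
--                 if index in button:
--                     supported_button_ids.append(button_id)
--             else:
--                 mimimums[button_id] = 0
--                 maximums[button_id] = 0
--         # assert len(supported_button_ids) > 0
--         if len(supported_button_ids) == 1:
--             button_id_to_delete: int = supported_button_ids[0]
--             press_count: int = required_joltage
--             # assert mimimums[button_id_to_delete] <= press_count
--             # assert maximums[button_id_to_delete] >= press_count
--             mimimums[button_id_to_delete] = press_count
--             maximums[button_id_to_delete] = press_count
--         else:
--             max_press_count: int = required_joltage
--             for button_id in supported_button_ids:
--                 friends[button_id].update(set(supported_button_ids) - {button_id})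
--                 if maximums[button_id] > max_press_count:
--                     maximums[button_id] = max_press_count
--                     # assert (mimimums[button_id] <= maximums[button_id]), f'mimimums[{button_id}] = {mimimums[button_id]}, maximums[{button_id}] = {maximums[button_id]}'
--         affecting_button_counts[index] = len(supported_button_ids)
--     return affecting_button_counts, mimimums, maximums, friends
-- ===== SOURCE B (Python) =====
-- def possible_ranges(required_joltages: list[int], buttons: list[tuple[int, ...]]) -> tuple[list[int], list[int], list[int], list[set[int]]]:
--     n = len(required_joltages)
--     # invert: for each index, which buttons contain it (button ids in increasing order)
--     supported: list[list[int]] = [[] for _ in range(n)]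
--     for button_id, button in enumerate(buttons):
--         for idx in set(button):
--             if 0 <= idx < n:
--                 supported[idx].append(button_id)
--     counts = [len(s) for s in supported]
--     mins = [0] * len(buttons)
--     maxs = [max(required_joltages)] * len(buttons)
--     friends: list[set[int]] = [set() for _ in buttons]
--     for rj, sup in zip(required_joltages, supported):
--         if len(sup) == 1:
--             mins[sup[0]] = rj
--             maxs[sup[0]] = rj
--         else:
--             others = set(sup)
--             for b in sup:
--                 friends[b] |= others - {b}
--                 if maxs[b] > rj:
--                     maxs[b] = rj
--     return counts, mins, maxs, friends
-- ===== Notes on version B (the rewrite author's own statement) =====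
-- stated objective: faster
-- what changed: B inverts the buttons once into an index->supporting-button-ids table (one pass over all button elements) and then processes each joltage index against its precomputed support list, removing A's inner scan over all buttons at every index; counts become a map over the table.
import Mathlib
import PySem

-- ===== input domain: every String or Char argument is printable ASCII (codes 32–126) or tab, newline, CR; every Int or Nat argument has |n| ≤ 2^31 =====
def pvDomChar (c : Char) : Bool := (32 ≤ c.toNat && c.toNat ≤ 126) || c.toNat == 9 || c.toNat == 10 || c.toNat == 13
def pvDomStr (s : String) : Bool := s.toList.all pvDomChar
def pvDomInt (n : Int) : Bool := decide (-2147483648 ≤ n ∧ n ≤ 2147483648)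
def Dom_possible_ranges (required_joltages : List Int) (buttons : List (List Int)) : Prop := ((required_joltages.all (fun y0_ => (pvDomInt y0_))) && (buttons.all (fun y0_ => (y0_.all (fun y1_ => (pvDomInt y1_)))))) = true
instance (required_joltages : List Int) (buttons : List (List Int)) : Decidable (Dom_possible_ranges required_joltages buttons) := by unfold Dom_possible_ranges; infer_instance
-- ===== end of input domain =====

-- B replaces A's per-index scan over all buttons by a single inversion pass building an
-- index → supporting-button-ids table (objective: faster, asymptotic).

-- ===== PORT A =====
-- inner 'for button_id, button in enumerate(buttons): if index in button: append(button_id)'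
def pvSupScanA (idx : Int) : Nat → List Int → List (List Int) → List Int
  | _, acc, [] => acc
  | bid, acc, b :: rest =>
      pvSupScanA idx (bid + 1) (if idx ∈ b then acc ++ [(bid : Int)] else acc) rest

-- inner 'for button_id in supported_button_ids: friends[...].update(...); if maximums[...] > ...'
def pvMultiA (rj : Int) (sup : List Int) : List Int → List Int → List (List Int) → List Int × List (List Int)
  | [], maxs, friends => (maxs, friends)
  | b :: rest, maxs, friends =>
      let friends' := friends.set b.toNat
        (PySem.Set.update (friends.getD b.toNat []) (PySem.Set.diff (PySem.Set.ofList sup) [b]))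
      let maxs' := if maxs.getD b.toNat 0 > rj then maxs.set b.toNat rj else maxs
      pvMultiA rj sup rest maxs' friends'

-- outer 'for index, required_joltage in enumerate(required_joltages): …'
def pvLoopA (buttons : List (List Int)) :
    Nat → List Int → List Int × List Int × List Int × List (List Int) →
    List Int × List Int × List Int × List (List Int)
  | _, [], st => st
  | idx, rj :: rest, (counts, mins, maxs, friends) =>
      let sup := pvSupScanA (idx : Int) 0 [] buttons
      if sup.length = 1 then
        let b := sup.getD 0 0
        pvLoopA buttons (idx + 1) rest
          (counts.set idx (sup.length : Int), mins.set b.toNat rj, maxs.set b.toNat rj, friends)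
      else
        let mf := pvMultiA rj sup sup maxs friends
        pvLoopA buttons (idx + 1) rest
          (counts.set idx (sup.length : Int), mins, mf.1, mf.2)

def possible_ranges (required_joltages : List Int) (buttons : List (List Int)) :
    List Int × List Int × List Int × List (List Int) :=
  let counts : List Int := List.replicate required_joltages.length 0
  let mins : List Int := List.replicate buttons.length 0
  let maxs : List Int :=
    List.replicate buttons.length ((PySem.List.max? required_joltages (fun x => x)).getD 0)
  let friends : List (List Int) := List.replicate buttons.length []
  pvLoopA buttons 0 required_joltages (counts, mins, maxs, friends)

-- ===== PORT B =====
-- 'for idx in set(button): if 0 <= idx < n: supported[idx].append(button_id)'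
def pvStepB (n : Nat) (bid : Nat) (b : List Int) (t : List (List Int)) : List (List Int) :=
  (PySem.Set.ofList b).foldl
    (fun t x => if 0 ≤ x ∧ x < (n : Int) then t.set x.toNat (t.getD x.toNat [] ++ [(bid : Int)]) else t) t

-- 'for button_id, button in enumerate(buttons): …'
def pvInvertB (n : Nat) : Nat → List (List Int) → List (List Int) → List (List Int)
  | _, [], t => t
  | bid, b :: rest, t => pvInvertB n (bid + 1) rest (pvStepB n bid b t)

-- 'for b in sup: friends[b] |= others - {b}; if maxs[b] > rj: maxs[b] = rj'
def pvMultiB (rj : Int) (others : List Int) : List Int → List Int → List (List Int) → List Int × List (List Int)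
  | [], maxs, friends => (maxs, friends)
  | b :: rest, maxs, friends =>
      let friends' := friends.set b.toNat
        (PySem.Set.update (friends.getD b.toNat []) (PySem.Set.diff others [b]))
      let maxs' := if maxs.getD b.toNat 0 > rj then maxs.set b.toNat rj else maxs
      pvMultiB rj others rest maxs' friends'

-- 'for rj, sup in zip(required_joltages, supported): …'
def pvLoopB : List (Int × List Int) → List Int × List Int × List (List Int) →
    List Int × List Int × List (List Int)
  | [], st => st
  | (rj, sup) :: rest, (mins, maxs, friends) =>
      if sup.length = 1 then
        let b := sup.getD 0 0
        pvLoopB rest (mins.set b.toNat rj, maxs.set b.toNat rj, friends)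
      else
        let mf := pvMultiB rj (PySem.Set.ofList sup) sup maxs friends
        pvLoopB rest (mins, mf.1, mf.2)

def possible_ranges_alt (required_joltages : List Int) (buttons : List (List Int)) :
    List Int × List Int × List Int × List (List Int) :=
  let n := required_joltages.length
  let table := pvInvertB n 0 buttons (List.replicate n [])
  let counts := table.map (fun s => (s.length : Int))
  let mins : List Int := List.replicate buttons.length 0
  let maxs : List Int :=
    List.replicate buttons.length ((PySem.List.max? required_joltages (fun x => x)).getD 0)
  let friends : List (List Int) := List.replicate buttons.length []
  let mmf := pvLoopB (required_joltages.zip table) (mins, maxs, friends)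
  (counts, mmf.1, mmf.2.1, mmf.2.2)

-- ===== PRECONDITION & SPEC =====
-- Pre_ excludes only the empty joltage list, on which A's max(required_joltages) raises ValueError.
def Pre_possible_ranges (required_joltages : List Int) (buttons : List (List Int)) : Prop :=
  required_joltages ≠ []
instance (required_joltages : List Int) (buttons : List (List Int)) : Decidable (Pre_possible_ranges required_joltages buttons) := by unfold Pre_possible_ranges; infer_instance

def pvWitness_possible_ranges : List Int × List (List Int) := ([3, 5, 2], [[0, 2], [1], [0, 1]])

def Spec_possible_ranges (required_joltages : List Int) (buttons : List (List Int)) (out : List Int × List Int × List Int × List (List Int)) : Prop := out = possible_ranges_alt required_joltages buttons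
instance (required_joltages : List Int) (buttons : List (List Int)) (out : List Int × List Int × List Int × List (List Int)) : Decidable (Spec_possible_ranges required_joltages buttons out) := by unfold Spec_possible_ranges; infer_instance

-- ===== CLAIM (what is proved, stated in full; the proofs are below) =====
def Claim_equal_possible_ranges : Prop := ∀ (required_joltages : List Int) (buttons : List (List Int)), Dom_possible_ranges required_joltages buttons → Pre_possible_ranges required_joltages buttons → Spec_possible_ranges required_joltages buttons (possible_ranges required_joltages buttons)

-- ===== LEMMAS AND PROOFS =====

-- the two multi-update loops are the same once B's precomputed 'others' is set(sup)
theorem pvMultiA_eq_pvMultiB (rj : Int) (sup : List Int) :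
    ∀ (l maxs : List Int) (friends : List (List Int)),
      pvMultiA rj sup l maxs friends = pvMultiB rj (PySem.Set.ofList sup) l maxs friends := by
  intro l
  induction l with
  | nil => intro maxs friends; rfl
  | cons b rest ih => intro maxs friends; simp only [pvMultiA, pvMultiB, ih]

theorem pvSupScanA_acc (idx : Int) :
    ∀ (bs : List (List Int)) (bid : Nat) (acc : List Int),
      pvSupScanA idx bid acc bs = acc ++ pvSupScanA idx bid [] bs := by
  intro bs
  induction bs with
  | nil => intro bid acc; simp [pvSupScanA]
  | cons b rest ih =>
      intro bid acc
      simp only [pvSupScanA]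
      rw [ih bid.succ (if idx ∈ b then acc ++ [(bid : Int)] else acc),
          ih bid.succ (if idx ∈ b then ([] : List Int) ++ [(bid : Int)] else [])]
      by_cases h : idx ∈ b <;> simp [h]

theorem pvStepB_length (n bid : Nat) (b : List Int) (t : List (List Int)) :
    (pvStepB n bid b t).length = t.length := by
  unfold pvStepB
  generalize PySem.Set.ofList b = l
  induction l generalizing t with
  | nil => rfl
  | cons x rest ih =>
      simp only [List.foldl_cons]
      rw [ih]
      by_cases h : 0 ≤ x ∧ x < (n : Int) <;> simp [h]

theorem pvInvertB_length (n : Nat) :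
    ∀ (bs : List (List Int)) (bid : Nat) (t : List (List Int)),
      (pvInvertB n bid bs t).length = t.length := by
  intro bs
  induction bs with
  | nil => intro bid t; rfl
  | cons b rest ih =>
      intro bid t
      simp only [pvInvertB]
      rw [ih, pvStepB_length]

-- a slot not named by the fold list is untouched
theorem pvStepB_foldl_notmem (n bid : Nat) (i : Nat)
    (l : List Int) (hni : (i : Int) ∉ l) :
    ∀ (t : List (List Int)),
      (l.foldl (fun t x => if 0 ≤ x ∧ x < (n : Int) then t.set x.toNat (t.getD x.toNat [] ++ [(bid : Int)]) else t) t).getD i []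
        = t.getD i [] := by
  induction l with
  | nil => intro t; rfl
  | cons x rest ih =>
      intro t
      simp only [List.mem_cons, not_or] at hni
      simp only [List.foldl_cons]
      rw [ih hni.2]
      by_cases h : 0 ≤ x ∧ x < (n : Int)
      · have hx : x.toNat ≠ i := by omega
        simp [h, List.getD, List.getElem?_set_ne hx]
      · simp [h]

theorem pvStepB_getD (n bid : Nat) (b : List Int) (i : Nat)
    (hi : i < n) :
    ∀ (t : List (List Int)), t.length = n →
      (pvStepB n bid b t).getD i []
        = t.getD i [] ++ (if (i : Int) ∈ PySem.Set.ofList b then [(bid : Int)] else []) := by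
  unfold pvStepB
  have hnd : (PySem.Set.ofList b).Nodup := PySem.Set.nodup_ofList b
  generalize PySem.Set.ofList b = l at hnd ⊢
  induction l with
  | nil => intro t _; simp
  | cons x rest ih =>
      intro t ht
      simp only [List.nodup_cons] at hnd
      simp only [List.foldl_cons]
      by_cases hx : x = (i : Int)
      · subst hx
        have hg : 0 ≤ (i : Int) ∧ (i : Int) < (n : Int) := by omega
        rw [if_pos hg]
        rw [pvStepB_foldl_notmem n bid i rest hnd.1]
        have hlt : i < t.length := by omega
        simp [List.getD, hlt]
      · have hrec := ih hnd.2
        by_cases hg : 0 ≤ x ∧ x < (n : Int)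
        · have hxi : x.toNat ≠ i := by omega
          rw [if_pos hg, hrec _ (by simp [ht])]
          simp [List.getD, List.getElem?_set_ne hxi, List.mem_cons, Ne.symm hx]
        · rw [if_neg hg, hrec _ ht]
          simp [List.mem_cons, Ne.symm hx]

theorem pvInvertB_getD (n : Nat) (i : Nat) (hi : i < n) :
    ∀ (bs : List (List Int)) (bid : Nat) (t : List (List Int)), t.length = n →
      (pvInvertB n bid bs t).getD i []
        = t.getD i [] ++ pvSupScanA (i : Int) bid [] bs := by
  intro bs
  induction bs with
  | nil => intro bid t _; simp [pvInvertB, pvSupScanA]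
  | cons b rest ih =>
      intro bid t ht
      simp only [pvInvertB, pvSupScanA]
      rw [ih (bid + 1) _ (by rw [pvStepB_length]; exact ht),
          pvStepB_getD n bid b i hi t ht, List.append_assoc]
      by_cases h : (i : Int) ∈ b
      · simp only [PySem.Set.mem_ofList, h, if_pos, List.nil_append]
        rw [pvSupScanA_acc (i : Int) rest (bid + 1) [(bid : Int)]]
      · simp [PySem.Set.mem_ofList, h]

-- A's successive counts writes, abstracted
def pvWrite : List Int → Nat → List Int → List Int
  | c, _, [] => c
  | c, idx, l :: r => pvWrite (c.set idx l) (idx + 1) r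

theorem pvWrite_spec :
    ∀ (ls c : List Int) (idx : Nat), idx + ls.length ≤ c.length →
      pvWrite c idx ls = c.take idx ++ ls ++ c.drop (idx + ls.length) := by
  intro ls
  induction ls with
  | nil => intro c idx h; simp [pvWrite, List.take_append_drop]
  | cons l r ih =>
      intro c idx h
      simp only [pvWrite, List.length_cons] at *
      rw [ih _ (idx + 1) (by simp only [List.length_set]; omega)]
      have hidx : idx < c.length := by omega
      rw [List.set_eq_take_cons_drop l hidx]
      have hT : (c.take idx).length = idx := by
        simp only [List.length_take]; omega
      have e1 : (c.take idx ++ l :: c.drop (idx + 1)).take (idx + 1)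
          = c.take idx ++ [l] := by
        rw [show idx + 1 = (c.take idx).length + 1 by rw [hT], List.take_length_add_append]
        rfl
      have e2 : (c.take idx ++ l :: c.drop (idx + 1)).drop (idx + 1 + r.length)
          = c.drop (idx + (r.length + 1)) := by
        rw [show idx + 1 + r.length = (c.take idx).length + (1 + r.length) by omega,
            List.drop_length_add_append]
        rw [show 1 + r.length = r.length + 1 by omega, List.drop_succ_cons, List.drop_drop]
        congr 1
        omega
      rw [e1, e2]
      simp

-- the two per-index loops agree when the table entries are A's scans
theorem pvLoop_eq (buttons : List (List Int)) :
    ∀ (rjs : List Int) (ts : List (List Int)) (idx : Nat)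
      (counts mins maxs : List Int) (friends : List (List Int)),
      (∀ k, k < rjs.length → ts.getD k [] = pvSupScanA ((idx + k : Nat) : Int) 0 [] buttons) →
      rjs.length ≤ ts.length →
      pvLoopA buttons idx rjs (counts, mins, maxs, friends)
        = (pvWrite counts idx ((rjs.zip ts).map (fun p => (p.2.length : Int))),
           pvLoopB (rjs.zip ts) (mins, maxs, friends)) := by
  intro rjs
  induction rjs with
  | nil => intro ts idx counts mins maxs friends _ _; simp [pvLoopA, pvLoopB, pvWrite]
  | cons rj rest ih =>
      intro ts idx counts mins maxs friends hsup hlen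
      match ts with
      | [] => simp at hlen
      | t0 :: ts' =>
        have h0 : t0 = pvSupScanA (idx : Int) 0 [] buttons := by
          have := hsup 0 (by simp)
          simpa using this
        have hsup' : ∀ k, k < rest.length →
            ts'.getD k [] = pvSupScanA (((idx + 1) + k : Nat) : Int) 0 [] buttons := by
          intro k hk
          have := hsup (k + 1) (by simp; omega)
          have harith : idx + (k + 1) = (idx + 1) + k := by omega
          simpa [harith] using this
        have hlen' : rest.length ≤ ts'.length := by simp at hlen; omega
        simp only [pvLoopA, List.zip_cons_cons, List.map_cons, pvWrite, pvLoopB, ← h0]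
        by_cases hone : t0.length = 1
        · simp only [hone, if_true]
          exact ih ts' (idx + 1) _ _ _ _ hsup' hlen'
        · simp only [hone, if_false]
          rw [pvMultiA_eq_pvMultiB]
          exact ih ts' (idx + 1) _ _ _ _ hsup' hlen'

-- ===== VERDICT (by name: the statement is the Claim_ definition above) =====
theorem possible_ranges_spec : Claim_equal_possible_ranges := by
  intro rjs buttons _ _
  unfold Spec_possible_ranges possible_ranges possible_ranges_alt
  set n := rjs.length with hn
  set table := pvInvertB n 0 buttons (List.replicate n []) with htab
  have htlen : table.length = n := by
    rw [htab, pvInvertB_length]; simp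
  have hsup : ∀ k, k < rjs.length →
      table.getD k [] = pvSupScanA ((0 + k : Nat) : Int) 0 [] buttons := by
    intro k hk
    rw [htab, pvInvertB_getD n k (by omega) buttons 0 _ (by simp)]
    simp
  rw [pvLoop_eq buttons rjs table 0 _ _ _ _ hsup (by omega)]
  have hzip : (rjs.zip table).map (fun p => (p.2.length : Int))
      = table.map (fun s => (s.length : Int)) := by
    calc (rjs.zip table).map (fun p => (p.2.length : Int))
        = ((rjs.zip table).map Prod.snd).map (fun s => (s.length : Int)) := by
          simp [List.map_map, Function.comp]
      _ = table.map (fun s => (s.length : Int)) := by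
          rw [List.map_snd_zip (by omega : table.length ≤ rjs.length)]
  rw [hzip, pvWrite_spec _ _ _
    (by simp only [List.length_replicate, List.length_map, htlen]; omega)]
  simp only [List.take_zero, List.nil_append, List.length_map, htlen, Nat.zero_add,
    List.drop_replicate, Nat.sub_self, List.replicate_zero, List.append_nil, ← htab]
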